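-- pv_equiv track=rewrite | github.com/abhishekir/CodingBat_Solutions | src/Array_2.py | has12
-- ===== SOURCE A (Python) =====
-- def has12(nums):
--     seen1 = False
--     for i in range(len(nums)):
--         if nums[i] == 1:
--             seen1 = True
--         elif nums[i] == 2 and seen1:
--             return True
--     return False
-- ===== SOURCE B (Python) =====
-- def has12(nums):
--     if 1 not in nums:
--         return False
--     i = nums.index(1)
--     return 2 in nums[i + 1:]
-- ===== Notes on version B (the rewrite author's own statement) =====
-- stated objective: simpler
-- what changed: Replaces the flag-carrying single pass (seen1 state machine with early return) by a two-phase index-first-then-suffix-membership: find the first 1 with index(), then test 2 in the suffix slice after it.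
import Mathlib
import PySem

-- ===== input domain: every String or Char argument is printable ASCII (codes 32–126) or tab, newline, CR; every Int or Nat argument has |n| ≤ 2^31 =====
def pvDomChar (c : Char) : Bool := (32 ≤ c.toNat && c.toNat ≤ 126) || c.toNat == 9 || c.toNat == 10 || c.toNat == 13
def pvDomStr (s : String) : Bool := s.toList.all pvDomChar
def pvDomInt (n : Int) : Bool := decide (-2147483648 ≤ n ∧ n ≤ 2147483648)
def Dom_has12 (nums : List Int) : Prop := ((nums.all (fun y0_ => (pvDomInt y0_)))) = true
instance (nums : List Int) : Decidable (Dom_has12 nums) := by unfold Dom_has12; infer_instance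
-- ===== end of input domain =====

-- B replaces A's flag-carrying single pass by index-of-first-1 then membership of 2 in the suffix; objective: simpler.

-- ===== PORT A =====
-- A's indexed loop with the seen1 flag and early return, as structural recursion over the list.
def has12Go : List Int → Bool → Bool
  | [], _ => false
  | x :: xs, seen1 =>
    if x = 1 then has12Go xs true
    else if x = 2 ∧ seen1 then true
    else has12Go xs seen1

def has12 (nums : List Int) : Bool := has12Go nums false

-- ===== PORT B =====
-- Source B: if 1 not in nums: return False; i = nums.index(1); return 2 in nums[i+1:]
def has12_alt (nums : List Int) : Bool :=
  if ¬ nums.contains 1 then false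
  else
    match PySem.List.index? nums 1 with
    | none => false
    | some i => (PySem.List.slice nums (some ((i : Int) + 1)) none).contains 2

-- ===== PRECONDITION & SPEC =====
def Spec_has12 (nums : List Int) (out : Bool) : Prop := out = has12_alt nums
instance (nums : List Int) (out : Bool) : Decidable (Spec_has12 nums out) := by unfold Spec_has12; infer_instance

-- ===== CLAIM (what is proved, stated in full; the proofs are below) =====
def Claim_equal_has12 : Prop := ∀ (nums : List Int), Dom_has12 nums → Spec_has12 nums (has12 nums)

-- ===== LEMMAS AND PROOFS =====

-- Once 1 has been seen, A's loop just scans for a 2.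
theorem has12Go_true (xs : List Int) : has12Go xs true = xs.contains 2 := by
  induction xs with
  | nil => simp [has12Go]
  | cons x xs ih =>
    simp only [has12Go]
    by_cases hx1 : x = 1
    · subst hx1; simp [ih]
    · by_cases hx2 : x = 2
      · subst hx2; simp
      · simp [hx1, hx2, ih]
        intro h; exact absurd h.symm hx2

theorem has12_eq_alt (nums : List Int) : has12 nums = has12_alt nums := by
  induction nums with
  | nil => simp [has12, has12Go, has12_alt]
  | cons x xs ih =>
    by_cases hx1 : x = 1
    · subst hx1
      have hidx : PySem.List.index? ((1 : Int) :: xs) 1 = some 0 :=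
        PySem.List.index?_cons_self ..
      simp only [has12, has12Go, has12_alt, hidx]
      rw [has12Go_true]
      have h1 : PySem.List.slice ((1 : Int) :: xs) (some 1) none
          = ((1 : Int) :: xs).drop 1 := by
        have := PySem.List.slice_from_natCast ((1 : Int) :: xs) 1
        simpa using this
      norm_num
      rw [h1]
      simp
    · have hidx := PySem.List.index?_cons_of_ne xs (v := (1 : Int)) hx1
      have hxnot2 : ¬ (x = 2 ∧ false = true) := by simp
      have hcc : ((x :: xs).contains 1) = (xs.contains 1) := by
        simp [eq_comm, hx1]
      simp only [has12, has12Go, has12_alt] at ih ⊢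
      rw [if_neg hx1, if_neg hxnot2, ih, hidx, hcc]
      by_cases hmem : (1 : Int) ∈ xs
      · obtain ⟨i, hi⟩ := Option.isSome_iff_exists.mp
          (PySem.List.index?_isSome_iff (xs := xs) (v := (1 : Int)) |>.mpr hmem)
        have hc : xs.contains 1 = true := by simpa using hmem
        rw [if_neg (by simp; exact hmem), if_neg (by simp; exact hmem)]
        simp only [hi, Option.map_some]
        have h1 : PySem.List.slice xs (some ((i : Int) + 1)) none = xs.drop (i + 1) := by
          have := PySem.List.slice_from_natCast xs (i + 1)
          simpa using this
        have h2 : PySem.List.slice (x :: xs) (some (((i : Nat) : Int) + 1 + 1)) none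
            = (x :: xs).drop (i + 2) := by
          have := PySem.List.slice_from_natCast (x :: xs) (i + 2)
          push_cast at this ⊢
          rw [show ((i : Int) + 1 + 1) = ((i : Int) + 2) by ring]
          exact this
        simp [h1, h2]
      · have hixnone : List.idxOf? (1 : Int) xs = none := by
          have := PySem.List.index?_eq_none_iff (xs := xs) (v := (1 : Int)) |>.mpr hmem
          simpa [PySem.List.index?_eq_idxOf?] using this
        simp [hmem]

-- ===== VERDICT (by name: the statement is the Claim_ definition above) =====
theorem has12_spec : Claim_equal_has12 := by
  intro nums _
  exact has12_eq_alt nums
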